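-- pv_equiv track=rewrite | github.com/yuro-s/cs313e | recursion2.py | split53Helper
-- ===== SOURCE A (Python) =====
-- def split53Helper(left_bucket,right_bucket,index,nums):
--     # if array is reached, check if value of two buckets are same
--     if index == len(nums):
--         if left_bucket == right_bucket:
--             return True
--         else:
--             return False
--     # store multiple of 5s in right_bucket
--     if nums[index] % 5 == 0:
--         return split53Helper(left_bucket, right_bucket + nums[index], index+1, nums)
--     # store multiple of 3s in left_bucket
--     if nums[index] % 3 == 0:
--         return split53Helper(left_bucket + nums[index], right_bucket, index+1, nums)
--     # take non multiple of 3 and 5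
--     return split53Helper(left_bucket, right_bucket + nums[index], index+1, nums) or split53Helper(left_bucket + nums[index], right_bucket, index+1, nums)
-- ===== SOURCE B (Python) =====
-- def split53Helper(left_bucket, right_bucket, index, nums):
--     # Subset-sum DP over reachable (left - right) differences instead of A's
--     # exponential branching recursion.
--     diffs = {left_bucket - right_bucket}
--     for i in range(index, len(nums)):
--         x = nums[i]
--         if x % 5 == 0:
--             diffs = {d - x for d in diffs}
--         elif x % 3 == 0:
--             diffs = {d + x for d in diffs}
--         else:
--             diffs = {d - x for d in diffs} | {d + x for d in diffs}
--     return 0 in diffs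
-- ===== Notes on version B (the rewrite author's own statement) =====
-- stated objective: alternative
-- what changed: Replaced A's branching recursion over per-index choices with a single left-to-right pass maintaining the set of reachable (left_bucket - right_bucket) differences (subset-sum style DP), answering whether difference 0 is reachable.
import Mathlib
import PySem

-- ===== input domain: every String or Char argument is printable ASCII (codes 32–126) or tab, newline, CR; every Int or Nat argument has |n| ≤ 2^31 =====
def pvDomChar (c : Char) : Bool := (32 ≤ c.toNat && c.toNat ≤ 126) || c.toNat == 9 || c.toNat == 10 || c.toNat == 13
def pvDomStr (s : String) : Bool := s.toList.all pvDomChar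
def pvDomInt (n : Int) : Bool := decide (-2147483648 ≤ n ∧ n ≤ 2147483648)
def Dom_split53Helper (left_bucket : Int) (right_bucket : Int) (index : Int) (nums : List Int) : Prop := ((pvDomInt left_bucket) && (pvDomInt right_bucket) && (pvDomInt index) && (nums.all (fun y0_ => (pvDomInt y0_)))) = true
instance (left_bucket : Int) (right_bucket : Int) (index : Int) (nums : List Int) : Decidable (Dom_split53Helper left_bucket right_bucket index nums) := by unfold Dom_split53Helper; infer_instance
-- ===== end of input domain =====

-- B re-implements A's branching recursion as a one-pass subset-sum DP over the set of
-- reachable (left_bucket - right_bucket) differences; return values proved equal.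

-- ===== PORT A =====
-- literal port of A's recursion; 'false' stands where Python raises IndexError (outside Pre_)
def split53Helper (left_bucket : Int) (right_bucket : Int) (index : Int) (nums : List Int) : Bool :=
  if index = (nums.length : Int) then
    (if left_bucket = right_bucket then true else false)
  else if _h : index < (nums.length : Int) then
    -- totality guard: for index > len(nums) Python raises IndexError (outside Pre_);
    -- nums[index] is pyGetD, exact under Pre_ (its default is only read where Python raises)
    if PySem.Int.mod (PySem.List.pyGetD nums index 0) 5 = 0 then
      split53Helper left_bucket (right_bucket + PySem.List.pyGetD nums index 0) (index + 1) nums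
    else if PySem.Int.mod (PySem.List.pyGetD nums index 0) 3 = 0 then
      split53Helper (left_bucket + PySem.List.pyGetD nums index 0) right_bucket (index + 1) nums
    else
      split53Helper left_bucket (right_bucket + PySem.List.pyGetD nums index 0) (index + 1) nums ||
      split53Helper (left_bucket + PySem.List.pyGetD nums index 0) right_bucket (index + 1) nums
  else false
termination_by ((nums.length : Int) - index).toNat
decreasing_by all_goals omega

-- ===== PORT B =====
-- one DP step: the set comprehensions of Source B ({d-x for d in diffs} etc.)
def altStep (diffs : PySem.Set Int) (x : Int) : PySem.Set Int :=
  if PySem.Int.mod x 5 = 0 then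
    PySem.Set.ofList (diffs.map (fun d => d - x))
  else if PySem.Int.mod x 3 = 0 then
    PySem.Set.ofList (diffs.map (fun d => d + x))
  else
    PySem.Set.union (PySem.Set.ofList (diffs.map (fun d => d - x))) (diffs.map (fun d => d + x))

-- literal port of Source B: fold over range(index, len(nums)); pyGetD's default is never read inside Pre_
def split53Helper_alt (left_bucket : Int) (right_bucket : Int) (index : Int) (nums : List Int) : Bool :=
  PySem.Set.contains
    ((PySem.List.pyRange index (nums.length : Int) 1).foldl
      (fun s j => altStep s (PySem.List.pyGetD nums j 0))
      (PySem.Set.ofList [left_bucket - right_bucket]))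
    0

-- ===== PRECONDITION & SPEC =====
-- Pre_ excludes exactly the inputs on which A raises IndexError (index out of [-len, len])
def Pre_split53Helper (left_bucket : Int) (right_bucket : Int) (index : Int) (nums : List Int) : Prop :=
  -(nums.length : Int) ≤ index ∧ index ≤ (nums.length : Int)
instance (left_bucket : Int) (right_bucket : Int) (index : Int) (nums : List Int) : Decidable (Pre_split53Helper left_bucket right_bucket index nums) := by unfold Pre_split53Helper; infer_instance
def pvWitness_split53Helper : Int × Int × Int × List Int := (0, 0, 0, [3, 5, 7])

def Spec_split53Helper (left_bucket : Int) (right_bucket : Int) (index : Int) (nums : List Int) (out : Bool) : Prop := out = split53Helper_alt left_bucket right_bucket index nums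
instance (left_bucket : Int) (right_bucket : Int) (index : Int) (nums : List Int) (out : Bool) : Decidable (Spec_split53Helper left_bucket right_bucket index nums out) := by unfold Spec_split53Helper; infer_instance

-- ===== CLAIM (what is proved, stated in full; the proofs are below) =====
def Claim_equal_split53Helper : Prop := ∀ (left_bucket : Int) (right_bucket : Int) (index : Int) (nums : List Int), Dom_split53Helper left_bucket right_bucket index nums → Pre_split53Helper left_bucket right_bucket index nums → Spec_split53Helper left_bucket right_bucket index nums (split53Helper left_bucket right_bucket index nums)
-- ===== LEMMAS AND PROOFS =====

-- the common abstraction: reachability of difference 0 over the remaining elements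
def reach (d : Int) (es : List Int) : Bool :=
  match es with
  | [] => decide (d = 0)
  | x :: es =>
    if PySem.Int.mod x 5 = 0 then reach (d - x) es
    else if PySem.Int.mod x 3 = 0 then reach (d + x) es
    else reach (d - x) es || reach (d + x) es

-- A computes reach of the traversed elements
theorem A_eq_reach (nums : List Int) :
    ∀ (n : Nat) (l r : Int), (n : Int) ≤ 2 * nums.length →
      split53Helper l r ((nums.length : Int) - n) nums =
        reach (l - r) ((PySem.List.pyRange ((nums.length : Int) - n) (nums.length : Int) 1).map
          (fun j => PySem.List.pyGetD nums j 0)) := by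
  intro n
  induction n with
  | zero =>
    intro l r _
    rw [split53Helper]
    simp [reach]
    omega
  | succ n ih =>
    intro l r hn
    push_cast at hn ⊢
    have hlt : (nums.length : Int) - ((n : Int) + 1) < nums.length := by omega
    have hge : -(nums.length : Int) ≤ (nums.length : Int) - ((n : Int) + 1) := by omega
    set x := PySem.List.pyGetD nums ((nums.length : Int) - ((n : Int) + 1)) 0 with hD
    have hstep : (nums.length : Int) - ((n : Int) + 1) + 1 = (nums.length : Int) - n := by ring
    rw [split53Helper]
    rw [if_neg (by omega), dif_pos hlt]
    rw [PySem.List.pyRange_one_cons hlt, List.map_cons, ← hD, hstep, reach]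
    have ih5 := ih l (r + x) (by omega)
    have ih3 := ih (l + x) r (by omega)
    push_cast at ih5 ih3
    split_ifs with h5 h3
    · rw [ih5]; congr 1; ring
    · rw [ih3]; congr 1; ring
    · rw [ih5, ih3]; congr 2 <;> ring

-- B's fold over a set of start differences reaches 0 iff some start difference does
theorem foldl_altStep_reach (es : List Int) :
    ∀ (S : PySem.Set Int),
      ((es.foldl altStep S).contains 0 = true) ↔ ∃ d ∈ S, reach d es = true := by
  induction es with
  | nil =>
    intro S
    simp [reach]
  | cons x es ih =>
    intro S
    rw [List.foldl_cons, ih]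
    constructor
    · rintro ⟨d', hd', hr⟩
      unfold altStep at hd'
      split_ifs at hd' with h5 h3
      · rw [PySem.Set.mem_ofList] at hd'
        obtain ⟨d, hd, rfl⟩ := List.mem_map.mp hd'
        exact ⟨d, hd, by rw [reach, if_pos h5]; exact hr⟩
      · rw [PySem.Set.mem_ofList] at hd'
        obtain ⟨d, hd, rfl⟩ := List.mem_map.mp hd'
        exact ⟨d, hd, by rw [reach, if_neg h5, if_pos h3]; exact hr⟩
      · rw [PySem.Set.mem_union] at hd'
        rcases hd' with hd' | hd'
        · rw [PySem.Set.mem_ofList] at hd'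
          obtain ⟨d, hd, rfl⟩ := List.mem_map.mp hd'
          exact ⟨d, hd, by rw [reach, if_neg h5, if_neg h3, hr, Bool.true_or]⟩
        · obtain ⟨d, hd, rfl⟩ := List.mem_map.mp hd'
          exact ⟨d, hd, by rw [reach, if_neg h5, if_neg h3, hr, Bool.or_true]⟩
    · rintro ⟨d, hd, hr⟩
      unfold altStep
      rw [reach] at hr
      split_ifs with h5 h3
      · rw [if_pos h5] at hr
        exact ⟨d - x, by rw [PySem.Set.mem_ofList]; exact List.mem_map.mpr ⟨d, hd, rfl⟩, hr⟩
      · rw [if_neg h5, if_pos h3] at hr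
        exact ⟨d + x, by rw [PySem.Set.mem_ofList]; exact List.mem_map.mpr ⟨d, hd, rfl⟩, hr⟩
      · rw [if_neg h5, if_neg h3] at hr
        rcases Bool.or_eq_true_iff.mp hr with hr | hr
        · refine ⟨d - x, ?_, hr⟩
          rw [PySem.Set.mem_union]
          left
          rw [PySem.Set.mem_ofList]
          exact List.mem_map.mpr ⟨d, hd, rfl⟩
        · refine ⟨d + x, ?_, hr⟩
          rw [PySem.Set.mem_union]
          right
          exact List.mem_map.mpr ⟨d, hd, rfl⟩

theorem B_eq_reach (l r i : Int) (nums : List Int) :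
    split53Helper_alt l r i nums =
      reach (l - r) ((PySem.List.pyRange i (nums.length : Int) 1).map
        (fun j => PySem.List.pyGetD nums j 0)) := by
  unfold split53Helper_alt
  rw [Bool.eq_iff_iff, ← List.foldl_map, foldl_altStep_reach]
  constructor
  · rintro ⟨d, hd, hr⟩
    simp [PySem.Set.mem_ofList] at hd
    rwa [hd] at hr
  · intro hr
    exact ⟨l - r, by simp [PySem.Set.mem_ofList], hr⟩

-- ===== VERDICT (by name: the statement is the Claim_ definition above) =====
theorem split53Helper_spec : Claim_equal_split53Helper := by
  intro l r i nums _ hpre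
  obtain ⟨h1, h2⟩ := hpre
  unfold Spec_split53Helper
  have hn : i = (nums.length : Int) - ((nums.length : Int) - i).toNat := by omega
  rw [B_eq_reach, hn]
  exact A_eq_reach nums ((nums.length : Int) - i).toNat l r (by omega)
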